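-- pv_equiv track=rewrite | github.com/V1B3hR/3NGIN3 | DuetMindAgent.py | _derive_highest_severity
-- ===== SOURCE A (Python) =====
-- from enum import Enum
-- from typing import Any, Callable, Dict, List, Optional, Tuple, Union
--
-- class Severity(str, Enum):
--     MINOR = "minor"
--     MAJOR = "major"
--     SEVERE = "severe"
--
-- def _parse_severity(value: str | Severity | None) -> Severity:
--     if isinstance(value, Severity):
--         return value
--     if not value:
--         return Severity.MINOR
--     v = str(value).lower()
--     if v == "severe":
--         return Severity.SEVERE
--     if v == "major":
--         return Severity.MAJOR
--     return Severity.MINOR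
--
-- def _derive_highest_severity(violations: List[Dict[str, Any]]) -> Severity:
--     if not violations:
--         return Severity.MINOR
--     order = {Severity.MINOR: 1, Severity.MAJOR: 2, Severity.SEVERE: 3}
--     best = Severity.MINOR
--     for v in violations:
--         sv = _parse_severity(v.get("severity"))
--         if order[sv] > order[best]:
--             best = sv
--     return best
-- ===== SOURCE B (Python) =====
-- from enum import Enum
--
-- class Severity(str, Enum):
--     MINOR = "minor"
--     MAJOR = "major"
--     SEVERE = "severe"
--
-- def _parse_severity(value):
--     if isinstance(value, Severity):
--         return value
--     if not value:
--         return Severity.MINOR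
--     v = str(value).lower()
--     if v == "severe":
--         return Severity.SEVERE
--     if v == "major":
--         return Severity.MAJOR
--     return Severity.MINOR
--
-- def _derive_highest_severity(violations):
--     present = {_parse_severity(v.get("severity")) for v in violations}
--     if Severity.SEVERE in present:
--         return Severity.SEVERE
--     if Severity.MAJOR in present:
--         return Severity.MAJOR
--     return Severity.MINOR
-- ===== Notes on version B (the rewrite author's own statement) =====
-- stated objective: simpler
-- what changed: Replaces the running best-accumulator with its order dict by collecting the set of parsed severities in one comprehension and resolving the result with a fixed-priority membership cascade.
import Mathlib
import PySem

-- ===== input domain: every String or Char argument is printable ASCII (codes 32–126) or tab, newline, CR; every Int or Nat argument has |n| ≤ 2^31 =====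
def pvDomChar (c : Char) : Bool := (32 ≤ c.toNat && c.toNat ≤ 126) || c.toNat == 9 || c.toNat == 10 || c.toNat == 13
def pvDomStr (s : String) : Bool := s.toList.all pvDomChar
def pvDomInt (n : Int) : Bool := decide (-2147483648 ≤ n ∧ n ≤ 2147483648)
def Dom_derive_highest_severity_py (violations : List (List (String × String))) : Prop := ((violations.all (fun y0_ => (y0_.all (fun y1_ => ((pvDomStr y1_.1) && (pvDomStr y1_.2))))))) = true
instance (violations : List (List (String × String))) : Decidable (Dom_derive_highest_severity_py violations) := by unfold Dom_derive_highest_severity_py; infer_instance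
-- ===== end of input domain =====

-- B replaces A's running best-accumulator (with its order dict) by a set of parsed
-- severities resolved through a fixed-priority membership cascade (objective: simpler).


-- ===== PORT A =====
-- shared helper: Python _parse_severity on an Optional[str] (the dict values are strings here)
def parseSeverity (value : Option String) : String :=
  match value with
  | none => "minor"
  | some s =>
    if s = "" then "minor"
    else
      let v := PySem.Str.lower s
      if v = "severe" then "severe"
      else if v = "major" then "major"
      else "minor"

def derive_highest_severity_py (violations : List (List (String × String))) : String :=
  if violations = [] then "minor"
  else
    let order : PySem.Dict String Int := PySem.Dict.mk [("minor", 1), ("major", 2), ("severe", 3)]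
    violations.foldl (fun best v =>
      let sv := parseSeverity ((PySem.Dict.mk v).get? "severity")
      if PySem.Dict.getD order sv 0 > PySem.Dict.getD order best 0 then sv else best) "minor"

-- ===== PORT B =====
def derive_highest_severity_py_alt (violations : List (List (String × String))) : String :=
  let present : PySem.Set String :=
    PySem.Set.ofList (violations.map (fun v => parseSeverity ((PySem.Dict.mk v).get? "severity")))
  if PySem.Set.contains present "severe" then "severe"
  else if PySem.Set.contains present "major" then "major"
  else "minor"

-- ===== PRECONDITION & SPEC =====
def Spec_derive_highest_severity_py (violations : List (List (String × String))) (out : String) : Prop := out = derive_highest_severity_py_alt violations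
instance (violations : List (List (String × String))) (out : String) : Decidable (Spec_derive_highest_severity_py violations out) := by unfold Spec_derive_highest_severity_py; infer_instance

-- ===== CLAIM (what is proved, stated in full; the proofs are below) =====
def Claim_equal_derive_highest_severity_py : Prop := ∀ (violations : List (List (String × String))), Dom_derive_highest_severity_py violations → Spec_derive_highest_severity_py violations (derive_highest_severity_py violations)

-- ===== LEMMAS AND PROOFS =====

-- A's loop step, on the already-parsed severity string
def sevStep (best sv : String) : String :=
  if PySem.Dict.getD (PySem.Dict.mk [("minor", 1), ("major", 2), ("severe", 3)] : PySem.Dict String Int) sv 0 >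
     PySem.Dict.getD (PySem.Dict.mk [("minor", 1), ("major", 2), ("severe", 3)] : PySem.Dict String Int) best 0
  then sv else best

@[simp] theorem sevStep_11 : sevStep "minor" "minor" = "minor" := by decide
@[simp] theorem sevStep_12 : sevStep "minor" "major" = "major" := by decide
@[simp] theorem sevStep_13 : sevStep "minor" "severe" = "severe" := by decide
@[simp] theorem sevStep_21 : sevStep "major" "minor" = "major" := by decide
@[simp] theorem sevStep_22 : sevStep "major" "major" = "major" := by decide
@[simp] theorem sevStep_23 : sevStep "major" "severe" = "severe" := by decide
@[simp] theorem sevStep_31 : sevStep "severe" "minor" = "severe" := by decide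
@[simp] theorem sevStep_32 : sevStep "severe" "major" = "severe" := by decide
@[simp] theorem sevStep_33 : sevStep "severe" "severe" = "severe" := by decide

theorem parseSeverity_cases (x : Option String) :
    parseSeverity x = "minor" ∨ parseSeverity x = "major" ∨ parseSeverity x = "severe" := by
  cases x with
  | none => left; rfl
  | some s =>
    simp only [parseSeverity]
    split_ifs <;> simp

-- characterisation of A's fold for any accumulator among the three severity strings
theorem foldSev (ps : List String) :
    ∀ b, (b = "minor" ∨ b = "major" ∨ b = "severe") →
    (∀ x ∈ ps, x = "minor" ∨ x = "major" ∨ x = "severe") →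
    ps.foldl sevStep b =
      (if "severe" ∈ ps ∨ b = "severe" then "severe"
       else if "major" ∈ ps ∨ b = "major" then "major"
       else "minor") := by
  induction ps with
  | nil =>
    intro b hb _
    rcases hb with rfl | rfl | rfl <;> simp
  | cons p ps ih =>
    intro b hb hmem
    have hp := hmem p (List.mem_cons_self ..)
    have hrest : ∀ x ∈ ps, x = "minor" ∨ x = "major" ∨ x = "severe" :=
      fun x hx => hmem x (List.mem_cons_of_mem _ hx)
    rcases hp with rfl | rfl | rfl <;> rcases hb with rfl | rfl | rfl <;>
      simp only [List.foldl_cons, sevStep_11, sevStep_12, sevStep_13, sevStep_21,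
        sevStep_22, sevStep_23, sevStep_31, sevStep_32, sevStep_33] <;>
      rw [ih _ (by simp) hrest] <;>
      (by_cases h1 : "severe" ∈ ps <;> by_cases h2 : "major" ∈ ps <;>
        simp [List.mem_cons, h1, h2])

-- ===== VERDICT (by name: the statement is the Claim_ definition above) =====
theorem derive_highest_severity_py_spec : Claim_equal_derive_highest_severity_py := by
  intro violations _
  unfold Spec_derive_highest_severity_py derive_highest_severity_py derive_highest_severity_py_alt
  by_cases hnil : violations = []
  · subst hnil; decide
  · simp only [if_neg hnil]
    have hmap : violations.foldl (fun best v =>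
        let sv := parseSeverity ((PySem.Dict.mk v).get? "severity")
        if PySem.Dict.getD (PySem.Dict.mk [("minor", 1), ("major", 2), ("severe", 3)] : PySem.Dict String Int) sv 0 >
           PySem.Dict.getD (PySem.Dict.mk [("minor", 1), ("major", 2), ("severe", 3)] : PySem.Dict String Int) best 0
        then sv else best) "minor" =
        (violations.map (fun v => parseSeverity ((PySem.Dict.mk v).get? "severity"))).foldl sevStep "minor" := by
      rw [List.foldl_map]; rfl
    rw [hmap, foldSev _ _ (by simp)
      (by intro x hx; simp only [List.mem_map] at hx; obtain ⟨v, _, rfl⟩ := hx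
          exact parseSeverity_cases _)]
    simp only [PySem.Set.contains_eq_listContains]
    by_cases h1 : "severe" ∈ violations.map (fun v => parseSeverity ((PySem.Dict.mk v).get? "severity")) <;>
    by_cases h2 : "major" ∈ violations.map (fun v => parseSeverity ((PySem.Dict.mk v).get? "severity")) <;>
      simp [PySem.Set.mem_ofList, h1, h2]
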